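-- pv_equiv track=rewrite | github.com/Duaard/ProgrammingProblems | HackerRank/Easy/CountingSort3/solution.py | getOccurenceCombined
-- ===== SOURCE A (Python) =====
-- def countList(arr, hi):
--     # Returns a list containing frequency of each num starting from hi
--
--     # Create a 0 array spanning the range of arr values
--     counter = [0] * hi
--
--     # Loop through the array and record each count
--     for i in range(len(arr)):
--         counter[int(arr[i][0])] += 1
--
--     return counter
--
-- def getOccurenceCombined(arr):
--     # Return a list of L's from 0-99
--     hi = 100
--     L = [0] * hi
--     counter = countList(arr, hi)
--
--     for i in range(hi):
--         if i != 0: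
--             # Combine the count plus previous count
--             L[i] = L[i - 1] + counter[i]
--         else:
--             L[i] = counter[i]
--
--     return L
-- ===== SOURCE B (Python) =====
-- def getOccurenceCombined(arr):
--     # L[i] = number of elements whose key (first entry) is <= i, counted directly
--     # per threshold; no histogram array and no prefix-sum pass.
--     return [sum(1 for x in arr if x[0] <= i) for i in range(100)]
-- ===== Notes on version B (the rewrite author's own statement) =====
-- stated objective: simpler
-- what changed: Replaces the 100-bucket histogram plus prefix-sum loop with a single comprehension that counts, for each threshold i in 0..99, the elements whose first entry is <= i. Pre_ restricts to the counting problem's natural key domain: it excludes empty rows and first entries outside [-100,100), on which A raises IndexError, and also negative first entries in [-100,-1], on which A returns a value only through Python negative-index wraparound into an arbitrary high bucket.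
import Mathlib
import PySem

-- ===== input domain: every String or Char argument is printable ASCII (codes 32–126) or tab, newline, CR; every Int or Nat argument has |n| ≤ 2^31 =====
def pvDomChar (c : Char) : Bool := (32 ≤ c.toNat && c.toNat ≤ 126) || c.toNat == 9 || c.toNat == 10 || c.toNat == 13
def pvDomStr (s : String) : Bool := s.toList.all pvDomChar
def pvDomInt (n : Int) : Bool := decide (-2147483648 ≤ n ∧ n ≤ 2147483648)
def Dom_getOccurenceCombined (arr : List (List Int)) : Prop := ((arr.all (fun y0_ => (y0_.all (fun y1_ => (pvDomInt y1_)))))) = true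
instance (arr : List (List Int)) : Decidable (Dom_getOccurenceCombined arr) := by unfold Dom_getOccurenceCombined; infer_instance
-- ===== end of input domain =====

-- B replaces A's histogram + prefix-sum loop by counting, per threshold i, the
-- elements with first entry ≤ i (objective: simpler; not faster).
-- Equivalence is about the return value; neither version mutates its argument.

-- ===== PORT A =====
-- countList: counter = [0]*hi; for i in range(len(arr)): counter[int(arr[i][0])] += 1
-- (pyGetD/pySetD are the total forms of Python indexing; exact under Pre_, which
-- keeps every index in range)
def countList (arr : List (List Int)) (hi : Int) : List Int :=
  let counter : List Int := List.replicate hi.toNat 0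
  (PySem.List.pyRange 0 arr.length 1).foldl
    (fun counter i =>
      let k := PySem.List.pyGetD (PySem.List.pyGetD arr i []) 0 0
      PySem.List.pySetD counter k (PySem.List.pyGetD counter k 0 + 1))
    counter

def getOccurenceCombined (arr : List (List Int)) : List Int :=
  let hi : Int := 100
  let L : List Int := List.replicate hi.toNat 0
  let counter := countList arr hi
  (PySem.List.pyRange 0 hi 1).foldl
    (fun L i =>
      if i ≠ 0 then
        PySem.List.pySetD L i (PySem.List.pyGetD L (i - 1) 0 + PySem.List.pyGetD counter i 0)
      else
        PySem.List.pySetD L i (PySem.List.pyGetD counter i 0))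
    L

-- ===== PORT B =====
-- [sum(1 for x in arr if x[0] <= i) for i in range(100)]
def getOccurenceCombined_alt (arr : List (List Int)) : List Int :=
  (PySem.List.pyRange 0 100 1).map (fun i =>
    arr.foldl (fun s x => if PySem.List.pyGetD x 0 0 ≤ i then s + 1 else s) 0)

-- ===== PRECONDITION & SPEC =====
-- Pre_ excludes empty rows and first entries outside [0,100), on which A raises
-- IndexError — except first entries in [-100,-1], where A returns a value only by
-- Python negative-index wraparound; those negative keys are outside the counting
-- problem's natural key domain 0–99 and are excluded with it.
def Pre_getOccurenceCombined (arr : List (List Int)) : Prop :=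
  ∀ x ∈ arr, x ≠ [] ∧ 0 ≤ x.headD 0 ∧ x.headD 0 < 100
instance (arr : List (List Int)) : Decidable (Pre_getOccurenceCombined arr) := by
  unfold Pre_getOccurenceCombined; infer_instance

def pvWitness_getOccurenceCombined : List (List Int) := [[3], [0], [99], [3, 7]]

def Spec_getOccurenceCombined (arr : List (List Int)) (out : List Int) : Prop := out = getOccurenceCombined_alt arr
instance (arr : List (List Int)) (out : List Int) : Decidable (Spec_getOccurenceCombined arr out) := by unfold Spec_getOccurenceCombined; infer_instance

-- ===== CLAIM (what is proved, stated in full; the proofs are below) =====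
def Claim_equal_getOccurenceCombined : Prop := ∀ (arr : List (List Int)), Dom_getOccurenceCombined arr → Pre_getOccurenceCombined arr → Spec_getOccurenceCombined arr (getOccurenceCombined arr)

-- ===== LEMMAS AND PROOFS =====

-- the key of a row, as both ports read it: x[0] with default 0
def pvKey (x : List Int) : Int := PySem.List.pyGetD x 0 0

theorem pvKey_eq_headD (x : List Int) : pvKey x = x.headD 0 := by
  cases x <;> simp [pvKey, PySem.List.pyGetD, PySem.List.pyGet?, PySem.List.pyIdx?]

-- number of rows with key ≤ i / key = i
def cntLe (arr : List (List Int)) (i : Int) : Int := (arr.countP (fun x => pvKey x ≤ i) : Int)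
def cntEq (arr : List (List Int)) (i : Int) : Int := (arr.countP (fun x => pvKey x = i) : Int)

-- A's per-row counting step (named for the lemmas below)
def pvStep (C : List Int) (x : List Int) : List Int :=
  PySem.List.pySetD C (pvKey x) (PySem.List.pyGetD C (pvKey x) 0 + 1)

-- B's inner fold counts rows with key ≤ i
theorem foldl_count (arr : List (List Int)) (i : Int) (s : Int) :
    arr.foldl (fun s x => if PySem.List.pyGetD x 0 0 ≤ i then s + 1 else s) s
      = s + cntLe arr i := by
  induction arr generalizing s with
  | nil => simp [cntLe]
  | cons x t ih =>
    simp only [List.foldl_cons, ih, cntLe, List.countP_cons, decide_eq_true_eq]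
    show (if pvKey x ≤ i then s + 1 else s) + _ = _
    split_ifs <;> push_cast <;> omega

theorem alt_eq_map (arr : List (List Int)) :
    getOccurenceCombined_alt arr
      = (PySem.List.pyRange 0 100 1).map (fun i => cntLe arr i) := by
  unfold getOccurenceCombined_alt
  refine List.map_congr_left (fun i _ => ?_)
  simpa using foldl_count arr i 0

-- cumulative relation: cntLe i = cntLe (i-1) + cntEq i
theorem cntLe_succ (arr : List (List Int)) (i : Int) :
    cntLe arr i = cntLe arr (i - 1) + cntEq arr i := by
  unfold cntLe cntEq
  induction arr with
  | nil => simp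
  | cons x t ih =>
    simp only [List.countP_cons, decide_eq_true_eq]
    push_cast at ih ⊢
    split_ifs <;> omega

-- under Pre_, keys are nonnegative, so cntLe at 0 is cntEq at 0
theorem cntLe_zero (arr : List (List Int)) (hp : Pre_getOccurenceCombined arr) :
    cntLe arr 0 = cntEq arr 0 := by
  unfold cntLe cntEq
  congr 1
  refine List.countP_congr (fun x hx => ?_)
  have h := (hp x hx).2.1
  rw [← pvKey_eq_headD] at h
  simp only [decide_eq_true_eq]
  omega

-- the counting fold over the rows, from an arbitrary 100-slot counter
theorem count_fold (l : List (List Int))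
    (hl : ∀ x ∈ l, 0 ≤ pvKey x ∧ pvKey x < 100) :
    ∀ C : List Int, C.length = 100 →
      (l.foldl pvStep C).length = 100 ∧
        ∀ k : Int, 0 ≤ k → k < 100 →
          PySem.List.pyGetD (l.foldl pvStep C) k 0 = PySem.List.pyGetD C k 0 + cntEq l k := by
  induction l with
  | nil => intro C hC; refine ⟨hC, fun k _ _ => ?_⟩; simp [cntEq]
  | cons x t ih =>
    intro C hC
    have hx := hl x (List.mem_cons_self ..)
    have hlt : ∀ y ∈ t, 0 ≤ pvKey y ∧ pvKey y < 100 := fun y hy => hl y (List.mem_cons_of_mem _ hy)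
    have hC' : (pvStep C x).length = 100 := by
      unfold pvStep
      rw [PySem.List.pySetD_of_nonneg _ _ hx.1, List.length_set, hC]
    obtain ⟨hlen, hget⟩ := ih hlt (pvStep C x) hC'
    refine ⟨by simpa using hlen, fun k hk0 hk100 => ?_⟩
    simp only [List.foldl_cons]
    rw [hget k hk0 hk100]
    have e1 : PySem.List.pyGetD (pvStep C x) k 0
        = PySem.List.pyGetD C k 0 + (if pvKey x = k then 1 else 0) := by
      have h1 : (((pvKey x).toNat : ℕ) : Int) = pvKey x := Int.toNat_of_nonneg hx.1
      have h2 : ((k.toNat : ℕ) : Int) = k := Int.toNat_of_nonneg hk0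
      unfold pvStep
      rw [← h1, ← h2, PySem.List.pyGetD_pySetD_natCast C _ _ _ 0 (by omega)]
      by_cases h : k.toNat = (pvKey x).toNat
      · rw [if_pos h, if_pos (show (((pvKey x).toNat : ℕ) : Int) = ((k.toNat : ℕ) : Int) by omega), h]
      · rw [if_neg h, if_neg (show ¬ (((pvKey x).toNat : ℕ) : Int) = ((k.toNat : ℕ) : Int) by omega), add_zero]
    rw [e1]
    unfold cntEq
    simp only [List.countP_cons, decide_eq_true_eq]
    split_ifs <;> push_cast <;> omega

theorem countList_spec (arr : List (List Int))
    (hp : Pre_getOccurenceCombined arr) :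
    (countList arr 100).length = 100 ∧
      ∀ k : Int, 0 ≤ k → k < 100 →
        PySem.List.pyGetD (countList arr 100) k 0 = cntEq arr k := by
  have harr : ∀ x ∈ arr, 0 ≤ pvKey x ∧ pvKey x < 100 := by
    intro x hx
    have h := hp x hx
    rw [← pvKey_eq_headD] at h
    exact ⟨h.2.1, h.2.2⟩
  have hrepl : ∀ k : Int, 0 ≤ k → k < 100 →
      PySem.List.pyGetD (List.replicate (100:Int).toNat (0:Int)) k 0 = 0 := by
    intro k hk0 hk100
    rw [PySem.List.pyGetD_eq_getElem _ _ hk0 (by simp; omega)]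
    exact List.getElem_replicate _
  have heq : countList arr 100 = arr.foldl pvStep (List.replicate (100:Int).toNat 0) := by
    unfold countList
    rw [PySem.List.foldl_pyRange_zero_pyGetD' arr ([] : List Int)
      (fun C x => PySem.List.pySetD C (PySem.List.pyGetD x 0 0)
        (PySem.List.pyGetD C (PySem.List.pyGetD x 0 0) 0 + 1))]
    rfl
  obtain ⟨h1, h2⟩ := count_fold arr harr (List.replicate (100:Int).toNat 0) (by simp)
  rw [heq]
  exact ⟨h1, fun k hk0 hk100 => by rw [h2 k hk0 hk100, hrepl k hk0 hk100]; ring⟩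

-- the prefix-sum loop of A, one range step at a time
theorem prefix_loop (arr : List (List Int)) (hp : Pre_getOccurenceCombined arr)
    (C : List Int) (hC : C.length = 100)
    (hCk : ∀ k : Int, 0 ≤ k → k < 100 → PySem.List.pyGetD C k 0 = cntEq arr k) :
    ∀ m : ℕ, m ≤ 100 →
      ((PySem.List.pyRange 0 (m : Int) 1).foldl
        (fun L i =>
          if i ≠ 0 then
            PySem.List.pySetD L i (PySem.List.pyGetD L (i - 1) 0 + PySem.List.pyGetD C i 0)
          else
            PySem.List.pySetD L i (PySem.List.pyGetD C i 0))
        (List.replicate (100:Int).toNat 0)).length = 100 ∧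
      ∀ k : ℕ, k < m →
        PySem.List.pyGetD
          ((PySem.List.pyRange 0 (m : Int) 1).foldl
            (fun L i =>
              if i ≠ 0 then
                PySem.List.pySetD L i (PySem.List.pyGetD L (i - 1) 0 + PySem.List.pyGetD C i 0)
              else
                PySem.List.pySetD L i (PySem.List.pyGetD C i 0))
            (List.replicate (100:Int).toNat 0)) (k : Int) 0 = cntLe arr (k : Int) := by
  intro m
  induction m with
  | zero =>
    intro _
    rw [PySem.List.pyRange_one_eq_nil (by norm_num)]
    exact ⟨by simp, fun k hk => absurd hk (Nat.not_lt_zero k)⟩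
  | succ n ih =>
    intro hm
    obtain ⟨hlen, hget⟩ := ih (by omega)
    have hsplit : PySem.List.pyRange 0 ((n+1 : ℕ) : Int) 1
        = PySem.List.pyRange 0 (n : Int) 1 ++ [(n : Int)] := by
      push_cast
      exact PySem.List.pyRange_one_succ_right (by positivity)
    rw [hsplit, List.foldl_append]
    set L := (PySem.List.pyRange 0 (n : Int) 1).foldl
      (fun L i =>
        if i ≠ 0 then
          PySem.List.pySetD L i (PySem.List.pyGetD L (i - 1) 0 + PySem.List.pyGetD C i 0)
        else
          PySem.List.pySetD L i (PySem.List.pyGetD C i 0))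
      (List.replicate (100:Int).toNat 0) with hLdef
    simp only [List.foldl_cons, List.foldl_nil]
    -- the value written at slot n is cntLe arr n
    have hval :
        (if (n : Int) ≠ 0 then
          PySem.List.pySetD L (n : Int) (PySem.List.pyGetD L ((n : Int) - 1) 0 + PySem.List.pyGetD C (n : Int) 0)
        else
          PySem.List.pySetD L (n : Int) (PySem.List.pyGetD C (n : Int) 0))
        = L.set n (cntLe arr (n : Int)) := by
      by_cases hn : n = 0
      · subst hn
        simp only [Int.natCast_zero, ne_eq, not_true_eq_false, if_false]
        rw [PySem.List.pySetD_of_nonneg _ _ le_rfl]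
        rw [hCk 0 le_rfl (by norm_num), ← cntLe_zero arr hp]
        rfl
      · have hn' : (n : Int) ≠ 0 := by exact_mod_cast hn
        rw [if_pos hn']
        rw [PySem.List.pySetD_of_nonneg _ _ (by positivity)]
        have h1 : PySem.List.pyGetD L ((n : Int) - 1) 0 = cntLe arr ((n : Int) - 1) := by
          have hc : ((n - 1 : ℕ) : Int) = (n : Int) - 1 := by omega
          rw [← hc]
          rw [hget (n-1) (by omega), hc]
        rw [h1, hCk (n : Int) (by positivity) (by exact_mod_cast hm),
            ← cntLe_succ arr (n : Int)]
        simp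
    rw [hval]
    refine ⟨by simp [List.length_set, hlen], fun k hk => ?_⟩
    rw [PySem.List.pyGetD_eq_getElem _ _ (by positivity) (by simp [hlen]; omega)]
    rw [List.getElem_set]
    by_cases hkn : k = n
    · subst hkn
      simp
    · have hne : ¬ (n = ((k : Int)).toNat) := by omega
      rw [if_neg hne]
      have hk' : k < n := by omega
      rw [← hget k hk']
      rw [PySem.List.pyGetD_eq_getElem _ _ (by positivity) (by rw [hlen]; exact_mod_cast hk'.trans (by omega))]

theorem getOccurenceCombined_spec' (arr : List (List Int))
    (hp : Pre_getOccurenceCombined arr) :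
    getOccurenceCombined arr = getOccurenceCombined_alt arr := by
  obtain ⟨hClen, hCk⟩ := countList_spec arr hp
  obtain ⟨hlen, hget⟩ := prefix_loop arr hp (countList arr 100) hClen hCk 100 le_rfl
  have h100 : ((100 : ℕ) : Int) = (100 : Int) := by norm_num
  rw [h100] at hlen hget
  rw [alt_eq_map]
  simp only [getOccurenceCombined]
  apply List.ext_getElem
  · rw [hlen, List.length_map, PySem.List.length_pyRange_one]
    decide
  · intro k hk1 hk2
    have hk : k < 100 := by rw [hlen] at hk1; exact hk1
    have h := hget k hk
    rw [PySem.List.pyGetD_ofNat _ k 0 (by rw [hlen]; exact hk)] at h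
    rw [List.getElem_map, PySem.List.getElem_pyRange_one]
    rw [h]
    norm_num

-- ===== VERDICT (by name: the statement is the Claim_ definition above) =====
theorem getOccurenceCombined_spec : Claim_equal_getOccurenceCombined := by
  intro arr _ hp
  unfold Spec_getOccurenceCombined
  exact getOccurenceCombined_spec' arr hp
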